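-- pv_equiv track=rewrite | github.com/libmap/backend-dev-python | lib/TweetForest.py | rename_ids
-- ===== SOURCE A (Python) =====
-- def rename_ids(data):
--     # Create a dictionary to store the count of each story ID
--     story_counts = {}
--
--     # Create a dictionary to store the length of each story
--     story_lengths = {}
--
--     # Calculate the length of each story before the loop
--     for tweet_id, values in data.items():
--         # Check if "story" key is present, otherwise use tweet_id as the story ID
--         story_id = values.get("story", tweet_id)
--
--         # Update the length of the story
--         story_lengths[story_id] = story_lengths.get(story_id, 0) + 1
--
--     # Iterate through the original dictionary and create a new one with modified keys
--     result = {}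
--     for tweet_id, values in data.items():
--         # Check if "story" key is present, otherwise use tweet_id as the story ID
--         story_id = values.get("story", tweet_id)
--
--         # Calculate the count as the difference between the length of the story and the current length
--         count = story_lengths[story_id]
--         story_lengths[story_id] = story_lengths[story_id] - 1
--
--         # Create the new key in the format "story_id.count_tweet_id"
--         new_key = f"{story_id}.{count}_{tweet_id}"
--         result[new_key] = values
--
--     return result
-- ===== SOURCE B (Python) =====
-- def rename_ids(data):
--     # One backward pass: the count of an entry equals the number of entries of its
--     # story from that position to the end, so ascending counters over reversed(data)
--     # replace A's precomputed-lengths-then-decrement scheme.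
--     seen = {}
--     rev_pairs = []
--     for tweet_id, values in reversed(list(data.items())):
--         story_id = values.get("story", tweet_id)
--         c = seen.get(story_id, 0) + 1
--         seen[story_id] = c
--         rev_pairs.append((f"{story_id}.{c}_{tweet_id}", values))
--     result = {}
--     for key, values in reversed(rev_pairs):
--         result[key] = values
--     return result
-- ===== Notes on version B (the rewrite author's own statement) =====
-- stated objective: alternative
-- what changed: Replaces A's two forward passes (precompute story lengths, then decrement a shared counts dict) by a single backward pass with ascending per-story counters (an entry's count is the number of same-story entries from it to the end), then inserts the prebuilt (key, value) pairs in original order.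
import Mathlib
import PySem

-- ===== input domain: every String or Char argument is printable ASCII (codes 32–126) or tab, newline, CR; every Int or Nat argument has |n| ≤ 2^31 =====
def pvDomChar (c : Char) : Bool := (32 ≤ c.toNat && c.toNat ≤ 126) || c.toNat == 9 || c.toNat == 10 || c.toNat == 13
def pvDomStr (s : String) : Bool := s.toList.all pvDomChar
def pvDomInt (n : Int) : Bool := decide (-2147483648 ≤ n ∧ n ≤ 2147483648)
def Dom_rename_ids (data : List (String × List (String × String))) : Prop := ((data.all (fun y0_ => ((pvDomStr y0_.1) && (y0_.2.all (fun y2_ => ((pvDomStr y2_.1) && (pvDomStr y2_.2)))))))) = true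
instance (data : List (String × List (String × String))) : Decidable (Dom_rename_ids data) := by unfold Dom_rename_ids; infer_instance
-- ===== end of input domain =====

-- B makes one backward pass with ascending per-story counters instead of A's two forward
-- passes over a precomputed-then-decremented lengths dict; same keys, values and order.

-- values.get("story", tweet_id): first-match lookup in the inner dict (exact Python dict.get)
def pvStory (tv : String × List (String × String)) : String :=
  (PySem.Dict.mk tv.2).getD "story" tv.1

-- f"{story_id}.{count}_{tweet_id}"
def pvKey (sid : String) (c : Int) (t : String) : String :=
  sid ++ "." ++ PySem.Int.toStr c ++ "_" ++ t

-- ===== PORT A =====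
def rename_ids (data : List (String × List (String × String))) : List (String × List (String × String)) :=
  let story_lengths : PySem.Dict String Int :=
    data.foldl (fun sl tv =>
      let sid := pvStory tv
      sl.insert sid (sl.getD sid 0 + 1)) PySem.Dict.empty
  let fin :=
    data.foldl (fun (st : PySem.Dict String Int × PySem.Dict String (List (String × String))) tv =>
      let sid := pvStory tv
      let count := st.1.getD sid 0
      let sl' := st.1.insert sid (count - 1)
      (sl', st.2.insert (pvKey sid count tv.1) tv.2)) (story_lengths, PySem.Dict.empty)
  fin.2.items

-- ===== PORT B =====
def rename_ids_alt (data : List (String × List (String × String))) : List (String × List (String × String)) :=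
  let built :=
    data.reverse.foldl (fun (st : PySem.Dict String Int × List (String × List (String × String))) tv =>
      let sid := pvStory tv
      let c := st.1.getD sid 0 + 1
      (st.1.insert sid c, st.2 ++ [(pvKey sid c tv.1, tv.2)]))
      ((PySem.Dict.empty : PySem.Dict String Int), [])
  (built.2.reverse.foldl
      (fun (r : PySem.Dict String (List (String × String))) kv => r.insert kv.1 kv.2)
      PySem.Dict.empty).items

-- ===== PRECONDITION & SPEC =====
def Spec_rename_ids (data : List (String × List (String × String))) (out : List (String × List (String × String))) : Prop := out = rename_ids_alt data
instance (data : List (String × List (String × String))) (out : List (String × List (String × String))) : Decidable (Spec_rename_ids data out) := by unfold Spec_rename_ids; infer_instance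

-- ===== CLAIM (what is proved, stated in full; the proofs are below) =====
def Claim_equal_rename_ids : Prop := ∀ (data : List (String × List (String × String))), Dom_rename_ids data → Spec_rename_ids data (rename_ids data)

-- ===== LEMMAS AND PROOFS =====

-- number (as a Python int) of entries of story sid in l
def pvCnt (l : List (String × List (String × String))) (sid : String) : Int :=
  ((l.countP (fun tv => pvStory tv == sid) : Nat) : Int)

-- the (new_key, values) sequence both programs insert, in data order
def pvKeyed : List (String × List (String × String)) → List (String × List (String × String))
  | [] => []
  | tv :: r => (pvKey (pvStory tv) (pvCnt (tv :: r) (pvStory tv)) tv.1, tv.2) :: pvKeyed r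

theorem pvCnt_cons (tv : String × List (String × String)) (r : List (String × List (String × String))) (sid : String) :
    pvCnt (tv :: r) sid = (if pvStory tv = sid then 1 else 0) + pvCnt r sid := by
  simp only [pvCnt, List.countP_cons, beq_iff_eq]
  split_ifs <;> push_cast <;> omega

theorem pvCnt_cons_self (tv : String × List (String × String)) (r : List (String × List (String × String))) :
    pvCnt (tv :: r) (pvStory tv) = 1 + pvCnt r (pvStory tv) := by
  rw [pvCnt_cons, if_pos rfl]

theorem pvCnt_cons_ne (tv : String × List (String × String)) (r : List (String × List (String × String)))
    (sid : String) (h : sid ≠ pvStory tv) : pvCnt (tv :: r) sid = pvCnt r sid := by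
  rw [pvCnt_cons, if_neg (fun e => h e.symm)]; omega

theorem lengths_foldl (l : List (String × List (String × String)))
    (sl : PySem.Dict String Int) (sid : String) :
    (l.foldl (fun sl tv =>
        let s := pvStory tv
        sl.insert s (sl.getD s 0 + 1)) sl).getD sid 0 = sl.getD sid 0 + pvCnt l sid := by
  induction l generalizing sl with
  | nil => simp [pvCnt]
  | cons tv r ih =>
      simp only [List.foldl_cons, ih]
      rw [PySem.Dict.getD_insert]
      by_cases heq : sid = pvStory tv
      · rw [if_pos heq, heq, pvCnt_cons_self]; omega
      · rw [if_neg heq, pvCnt_cons_ne _ _ _ heq]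

theorem loopA_foldl (l : List (String × List (String × String)))
    (sl : PySem.Dict String Int) (r : PySem.Dict String (List (String × String)))
    (h : ∀ sid, sl.getD sid 0 = pvCnt l sid) :
    (l.foldl (fun (st : PySem.Dict String Int × PySem.Dict String (List (String × String))) tv =>
        let sid := pvStory tv
        let count := st.1.getD sid 0
        let sl' := st.1.insert sid (count - 1)
        (sl', st.2.insert (pvKey sid count tv.1) tv.2)) (sl, r)).2
      = (pvKeyed l).foldl (fun r kv => r.insert kv.1 kv.2) r := by
  induction l generalizing sl r with
  | nil => simp [pvKeyed]
  | cons tv rest ih =>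
      simp only [List.foldl_cons, pvKeyed]
      rw [h (pvStory tv)]
      apply ih
      intro sid
      rw [PySem.Dict.getD_insert]
      by_cases heq : sid = pvStory tv
      · rw [if_pos heq, heq, pvCnt_cons_self]; omega
      · rw [if_neg heq]
        have h2 := h sid; rw [pvCnt_cons_ne _ _ _ heq] at h2; exact h2

theorem loopB_foldr (l : List (String × List (String × String))) :
    (∀ sid, (l.foldr (fun tv (st : PySem.Dict String Int × List (String × List (String × String))) =>
        let sid := pvStory tv
        let c := st.1.getD sid 0 + 1
        (st.1.insert sid c, st.2 ++ [(pvKey sid c tv.1, tv.2)]))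
        ((PySem.Dict.empty : PySem.Dict String Int), [])).1.getD sid 0 = pvCnt l sid)
    ∧ (l.foldr (fun tv (st : PySem.Dict String Int × List (String × List (String × String))) =>
        let sid := pvStory tv
        let c := st.1.getD sid 0 + 1
        (st.1.insert sid c, st.2 ++ [(pvKey sid c tv.1, tv.2)]))
        ((PySem.Dict.empty : PySem.Dict String Int), [])).2 = (pvKeyed l).reverse := by
  induction l with
  | nil => simp [pvCnt, pvKeyed]
  | cons tv r ih =>
      obtain ⟨ih1, ih2⟩ := ih
      constructor
      · intro sid
        simp only [List.foldr_cons]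
        rw [PySem.Dict.getD_insert]
        by_cases heq : sid = pvStory tv
        · rw [if_pos heq, heq, pvCnt_cons_self, ih1]; omega
        · rw [if_neg heq, pvCnt_cons_ne _ _ _ heq, ih1]
      · simp only [List.foldr_cons, pvKeyed, List.reverse_cons]
        rw [ih2, ih1]
        have hc : pvCnt (tv :: r) (pvStory tv) = pvCnt r (pvStory tv) + 1 := by
          rw [pvCnt_cons_self]; omega
        rw [hc]

-- ===== VERDICT (by name: the statement is the Claim_ definition above) =====
theorem rename_ids_spec : Claim_equal_rename_ids := by
  intro data _
  unfold Spec_rename_ids rename_ids rename_ids_alt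
  simp only [List.foldl_reverse]
  obtain ⟨h1, h2⟩ := loopB_foldr data
  rw [loopA_foldl data _ _ (fun sid => by rw [lengths_foldl]; simp)]
  rw [h2, List.foldr_reverse]
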